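-- pv_equiv track=rewrite | github.com/franchuk-olena/Algorithms_and_structures | HW5/t05_10_e2254.py | max_trucks
-- ===== SOURCE A (Python) =====
-- def min_transport_cost(X, R, k):
--     """Знаходить мінімальну вартість транспортування для k полів"""
--     prefix = [0] * (R + 1)
--     for i in range(R):
--         prefix[i + 1] = prefix[i] + X[i]
--
--     min_cost = float('inf')
--
--     # Проходимо по всіх можливих підмножинах довжиною k
--     for i in range(R - k + 1):
--         median_idx = i + k // 2  # Оптимальне місце для сховища
--         median_x = X[median_idx]
--
--         left_cost = median_x * (median_idx - i) - (prefix[median_idx] - prefix[i])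
--         right_cost = (prefix[i + k] - prefix[median_idx + 1]) - median_x * ((i + k - 1) - median_idx)
--
--         min_cost = min(min_cost, left_cost + right_cost)
--
--     return min_cost
--
-- def max_trucks(X, R, L, B):
--     """Бінарний пошук максимальної кількості полів, які можна обслужити"""
--     left, right = 0, R
--     while left < right:
--         mid = (left + right + 1) // 2
--         if min_transport_cost(X, R, mid) <= B:
--             left = mid
--         else:
--             right = mid - 1
--     return left
-- ===== SOURCE B (Python) =====
-- def max_trucks(X, R, L, B):
--     """Binary search for the largest k; feasibility of k decided by building
--     the list of per-window costs (direct scans around the median, no prefix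
--     table) and taking its min."""
--     def window_cost(i, k):
--         m = i + k // 2
--         mx = X[m]
--         return sum(mx - X[j] for j in range(i, m)) + \
--                sum(X[j] - mx for j in range(m + 1, i + k))
--
--     def feasible(k):
--         costs = [window_cost(i, k) for i in range(R - k + 1)]
--         return bool(costs) and min(costs) <= B
--
--     lo, hi = 0, R
--     while lo < hi:
--         mid = hi - (hi - lo) // 2
--         if feasible(mid):
--             lo = mid
--         else:
--             hi = mid - 1
--     return lo
-- ===== Notes on version B (the rewrite author's own statement) =====
-- stated objective: alternative
-- what changed: The prefix-sum table plus O(1) closed-form window costs and the running-min fold are replaced by building the explicit list of per-window costs via direct scans around the median and taking min() of that list; the binary search keeps the same iterates but computes the midpoint as hi - (hi-lo)//2 and tests a boolean feasibility predicate.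
import Mathlib
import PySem

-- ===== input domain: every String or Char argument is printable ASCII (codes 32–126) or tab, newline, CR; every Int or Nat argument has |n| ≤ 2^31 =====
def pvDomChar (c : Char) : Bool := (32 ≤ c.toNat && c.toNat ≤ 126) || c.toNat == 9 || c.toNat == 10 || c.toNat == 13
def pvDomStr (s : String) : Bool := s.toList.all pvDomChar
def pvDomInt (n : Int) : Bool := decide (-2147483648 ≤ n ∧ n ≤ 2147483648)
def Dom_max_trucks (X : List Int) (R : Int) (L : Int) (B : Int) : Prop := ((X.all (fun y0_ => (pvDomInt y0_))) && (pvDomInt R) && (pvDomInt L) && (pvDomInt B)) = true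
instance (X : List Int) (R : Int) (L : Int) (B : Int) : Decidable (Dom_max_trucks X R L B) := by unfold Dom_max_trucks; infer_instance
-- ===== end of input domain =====

-- B replaces A's prefix-sum table, closed-form window costs and running-min fold by an
-- explicit list of per-window costs obtained by direct scans around the median, taking
-- min() of that list; the midpoint is computed as hi - (hi-lo)//2 (objective: alternative).

-- ===== PORT A =====
-- prefix[i+1] = prefix[i] + X[i]; the append transliterates the in-place fill
-- (entries beyond i of the preallocated zero array are never read before being set).
def pvPrefixA (X : List Int) (R : Int) : List Int :=
  (PySem.List.pyRange 0 R 1).foldl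
    (fun p i => p ++ [PySem.List.pyGetD p i 0 + PySem.List.pyGetD X i 0])
    [0]

-- min_cost starts at float('inf'); modelled as Option Int with none = inf
def pvMinCostA (X : List Int) (R : Int) (k : Int) : Option Int :=
  let pre := pvPrefixA X R
  (PySem.List.pyRange 0 (R - k + 1) 1).foldl
    (fun mc i =>
      let medianIdx := i + PySem.Int.floordiv k 2
      let medianX := PySem.List.pyGetD X medianIdx 0
      let leftCost := medianX * (medianIdx - i) -
        (PySem.List.pyGetD pre medianIdx 0 - PySem.List.pyGetD pre i 0)
      let rightCost := (PySem.List.pyGetD pre (i + k) 0 -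
        PySem.List.pyGetD pre (medianIdx + 1) 0) - medianX * ((i + k - 1) - medianIdx)
      some (match mc with
            | none => leftCost + rightCost
            | some m => min m (leftCost + rightCost)))
    none

def pvLoopA (X : List Int) (R : Int) (B : Int) (left right : Int) : Int :=
  if h : left < right then
    let mid := PySem.Int.floordiv (left + right + 1) 2
    if (match pvMinCostA X R mid with | none => false | some c => decide (c ≤ B)) then
      pvLoopA X R B mid right
    else
      pvLoopA X R B left (mid - 1)
  else left
termination_by (right - left).toNat
decreasing_by
  all_goals
    simp only [PySem.Int.floordiv_eq_ediv_of_pos (by norm_num : (0:Int) < 2)]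
    omega

def max_trucks (X : List Int) (R : Int) (L : Int) (B : Int) : Int :=
  pvLoopA X R B 0 R

-- ===== PORT B =====
def pvWinCostB (X : List Int) (k i : Int) : Int :=
  let m := i + PySem.Int.floordiv k 2
  let mx := PySem.List.pyGetD X m 0
  ((PySem.List.pyRange i m 1).map (fun j => mx - PySem.List.pyGetD X j 0)).sum +
  ((PySem.List.pyRange (m + 1) (i + k) 1).map (fun j => PySem.List.pyGetD X j 0 - mx)).sum

def pvFeasibleB (X : List Int) (R : Int) (B : Int) (k : Int) : Bool :=
  let costs := (PySem.List.pyRange 0 (R - k + 1) 1).map (pvWinCostB X k)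
  match PySem.List.min? costs (fun c => c) with
  | none => false
  | some m => decide (m ≤ B)

def pvLoopB (X : List Int) (R : Int) (B : Int) (lo hi : Int) : Int :=
  if h : lo < hi then
    let mid := hi - PySem.Int.floordiv (hi - lo) 2
    if pvFeasibleB X R B mid then pvLoopB X R B mid hi
    else pvLoopB X R B lo (mid - 1)
  else lo
termination_by (hi - lo).toNat
decreasing_by
  all_goals
    simp only [PySem.Int.floordiv_eq_ediv_of_pos (by norm_num : (0:Int) < 2)]
    omega

def max_trucks_alt (X : List Int) (R : Int) (L : Int) (B : Int) : Int :=
  pvLoopB X R B 0 R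

-- ===== PRECONDITION & SPEC =====
-- Pre_ excludes exactly the inputs where Python A raises IndexError
-- (building the prefix table accesses X[0..R-1], so it needs R ≤ len(X));
-- B raises there too.
def Pre_max_trucks (X : List Int) (R : Int) (L : Int) (B : Int) : Prop :=
  R ≤ (X.length : Int)
instance (X : List Int) (R : Int) (L : Int) (B : Int) : Decidable (Pre_max_trucks X R L B) := by
  unfold Pre_max_trucks; infer_instance

def pvWitness_max_trucks : List Int × Int × Int × Int := ([1, 3, 7, 10], 4, 2, 9)

def Spec_max_trucks (X : List Int) (R : Int) (L : Int) (B : Int) (out : Int) : Prop := out = max_trucks_alt X R L B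
instance (X : List Int) (R : Int) (L : Int) (B : Int) (out : Int) : Decidable (Spec_max_trucks X R L B out) := by unfold Spec_max_trucks; infer_instance

-- ===== CLAIM (what is proved, stated in full; the proofs are below) =====
def Claim_equal_max_trucks : Prop := ∀ (X : List Int) (R : Int) (L : Int) (B : Int), Dom_max_trucks X R L B → Pre_max_trucks X R L B → Spec_max_trucks X R L B (max_trucks X R L B)

-- ===== LEMMAS AND PROOFS =====

-- partial sum of X[0..j) (via the total pyGetD; all uses have indices in range)
def pvS (X : List Int) (j : Int) : Int :=
  ((PySem.List.pyRange 0 j 1).map (fun t => PySem.List.pyGetD X t 0)).sum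

def pvSn (X : List Int) (n : Nat) : Int := pvS X (n : Int)

theorem pvSn_succ (X : List Int) (n : Nat) :
    pvSn X (n + 1) = pvSn X n + PySem.List.pyGetD X (n : Int) 0 := by
  unfold pvSn pvS
  rw [show (((n + 1) : Nat) : Int) = (n : Int) + 1 by push_cast; ring,
      PySem.List.pyRange_one_succ_right (by positivity), List.map_append, List.sum_append]
  simp

theorem prefixA_eq_nat (X : List Int) (n : Nat) :
    pvPrefixA X (n : Int) = (List.range (n + 1)).map (pvSn X) := by
  induction n with
  | zero =>
    simp [pvPrefixA, PySem.List.pyRange_one_eq_nil, pvSn, pvS]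
  | succ n ih =>
    unfold pvPrefixA at *
    rw [show (((n + 1) : Nat) : Int) = (n : Int) + 1 by push_cast; ring,
        PySem.List.pyRange_one_succ_right (by positivity), List.foldl_append, ih]
    have hget : PySem.List.pyGetD ((List.range (n + 1)).map (pvSn X)) (n : Int) 0 = pvSn X n := by
      rw [PySem.List.pyGetD_natCast, List.getD_eq_getElem _ _ (by simp)]
      simp
    simp only [List.foldl_cons, List.foldl_nil, hget]
    rw [List.range_succ (n := n + 1), List.map_append]
    simp only [List.map_cons, List.map_nil, pvSn_succ]

-- prefix[j] = sum of X[0..j) for 0 ≤ j ≤ R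
theorem prefixA_get (X : List Int) (R j : Int) (h0 : 0 ≤ j) (hR : j ≤ R) :
    PySem.List.pyGetD (pvPrefixA X R) j 0 = pvS X j := by
  have hR0 : 0 ≤ R := le_trans h0 hR
  rw [show R = ((R.toNat : Nat) : Int) by omega, prefixA_eq_nat,
      show j = ((j.toNat : Nat) : Int) by omega, PySem.List.pyGetD_natCast,
      List.getD_eq_getElem _ _ (by simp; omega)]
  simp [pvSn]

-- Σ_{j ∈ [a,b)} X[j] = S b − S a
theorem sum_pyRange_f (X : List Int) (a b : Int) (h0 : 0 ≤ a) (hab : a ≤ b) :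
    ((PySem.List.pyRange a b 1).map (fun t => PySem.List.pyGetD X t 0)).sum
      = pvS X b - pvS X a := by
  unfold pvS
  rw [PySem.List.pyRange_one_append 0 a b h0 hab, List.map_append, List.sum_append]
  ring

theorem pv_sum_map_sub (l : List Int) (f g : Int → Int) :
    (l.map (fun j => f j - g j)).sum = (l.map f).sum - (l.map g).sum := by
  induction l with
  | nil => simp
  | cons x t ih => simp [ih]; ring

theorem pv_sum_const (l : List Int) (c : Int) : (l.map (fun _ => c)).sum = l.length * c := by
  induction l with
  | nil => simp
  | cons x t ih => simp; ring

theorem pv_foldl_congr {α β : Type} (l : List α) (f g : β → α → β) (a : β)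
    (h : ∀ acc x, x ∈ l → f acc x = g acc x) : l.foldl f a = l.foldl g a := by
  induction l generalizing a with
  | nil => rfl
  | cons x t ih =>
    simp only [List.foldl_cons]
    rw [h a x (by simp)]
    exact ih _ (fun acc y hy => h acc y (by simp [hy]))

-- B's sum over [a,b) of (c − X[j]) in closed form
theorem pv_scan_left (X : List Int) (c a b : Int) (h0 : 0 ≤ a) (hab : a ≤ b) :
    ((PySem.List.pyRange a b 1).map (fun j => c - PySem.List.pyGetD X j 0)).sum
      = c * (b - a) - (pvS X b - pvS X a) := by
  rw [pv_sum_map_sub (PySem.List.pyRange a b 1) (fun _ => c) (fun j => PySem.List.pyGetD X j 0),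
      sum_pyRange_f X a b h0 hab, pv_sum_const, PySem.List.length_pyRange_one]
  have : (((b - a).toNat : Nat) : Int) = b - a := by omega
  rw [this]; ring

-- B's sum over [a,b) of (X[j] − c) in closed form
theorem pv_scan_right (X : List Int) (c a b : Int) (h0 : 0 ≤ a) (hab : a ≤ b) :
    ((PySem.List.pyRange a b 1).map (fun j => PySem.List.pyGetD X j 0 - c)).sum
      = (pvS X b - pvS X a) - c * (b - a) := by
  rw [pv_sum_map_sub (PySem.List.pyRange a b 1) (fun j => PySem.List.pyGetD X j 0) (fun _ => c),
      sum_pyRange_f X a b h0 hab, pv_sum_const, PySem.List.length_pyRange_one]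
  have : (((b - a).toNat : Nat) : Int) = b - a := by omega
  rw [this]; ring

-- A's closed-form window cost equals B's scanned window cost
theorem winCost_eq (X : List Int) (R k i : Int) (hk : 1 ≤ k) (hi : 0 ≤ i)
    (hik : i + k ≤ R) :
    let pre := pvPrefixA X R
    let m := i + PySem.Int.floordiv k 2
    let mx := PySem.List.pyGetD X m 0
    mx * (m - i) - (PySem.List.pyGetD pre m 0 - PySem.List.pyGetD pre i 0) +
      ((PySem.List.pyGetD pre (i + k) 0 - PySem.List.pyGetD pre (m + 1) 0) -
        mx * ((i + k - 1) - m))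
    = pvWinCostB X k i := by
  intro pre m mx
  have hf2 := PySem.Int.floordiv_eq_ediv_of_pos (a := k) (b := 2) (by norm_num)
  have hm1 : i ≤ m := by simp only [m]; rw [hf2]; omega
  have hm2 : m + 1 ≤ i + k := by simp only [m]; rw [hf2]; omega
  show _ = ((PySem.List.pyRange i m 1).map (fun j => mx - PySem.List.pyGetD X j 0)).sum +
    ((PySem.List.pyRange (m + 1) (i + k) 1).map (fun j => PySem.List.pyGetD X j 0 - mx)).sum
  rw [pv_scan_left X mx i m hi hm1, pv_scan_right X mx (m + 1) (i + k) (by omega) hm2]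
  simp only [pre]
  rw [prefixA_get X R m (by omega) (by omega), prefixA_get X R i hi (by omega),
      prefixA_get X R (i + k) (by omega) (by omega),
      prefixA_get X R (m + 1) (by omega) (by omega)]
  ring

-- the A-side running-min fold over a list of costs, as the min of the list
theorem pv_fold_some (t : List Int) (f : Int → Int) (a : Int) :
    t.foldl (fun mc i => some (match mc with | none => f i | some m => min m (f i))) (some a)
      = some ((t.map f).foldl min a) := by
  induction t generalizing a with
  | nil => rfl
  | cons x s ih => simp only [List.foldl_cons, List.map_cons]; exact ih _

theorem pv_fold_min? (l : List Int) (f : Int → Int) :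
    l.foldl (fun mc i => some (match mc with | none => f i | some m => min m (f i))) none
      = PySem.List.min? (l.map f) (fun c => c) := by
  cases l with
  | nil => rfl
  | cons x t =>
    simp only [List.foldl_cons, List.map_cons, pv_fold_some, PySem.List.min?_id_cons]

-- the feasibility tests agree for every k the binary search can pass
theorem feas_eq (X : List Int) (R B k : Int) (hk : 1 ≤ k) :
    (match pvMinCostA X R k with | none => false | some c => decide (c ≤ B))
      = pvFeasibleB X R B k := by
  unfold pvMinCostA pvFeasibleB
  have hcost :
      (PySem.List.pyRange 0 (R - k + 1) 1).foldl
        (fun mc i =>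
          let medianIdx := i + PySem.Int.floordiv k 2
          let medianX := PySem.List.pyGetD X medianIdx 0
          let leftCost := medianX * (medianIdx - i) -
            (PySem.List.pyGetD (pvPrefixA X R) medianIdx 0 - PySem.List.pyGetD (pvPrefixA X R) i 0)
          let rightCost := (PySem.List.pyGetD (pvPrefixA X R) (i + k) 0 -
            PySem.List.pyGetD (pvPrefixA X R) (medianIdx + 1) 0) - medianX * ((i + k - 1) - medianIdx)
          some (match mc with
                | none => leftCost + rightCost
                | some m => min m (leftCost + rightCost)))
        none
      = PySem.List.min? ((PySem.List.pyRange 0 (R - k + 1) 1).map (pvWinCostB X k))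
          (fun c => c) := by
    rw [← pv_fold_min? (PySem.List.pyRange 0 (R - k + 1) 1) (pvWinCostB X k)]
    apply pv_foldl_congr
    intro mc i hi
    rw [PySem.List.mem_pyRange_one] at hi
    have hw := winCost_eq X R k i hk (by omega) (by omega)
    simp only at hw
    simp only [← hw]
  simp only [hcost]

theorem loop_eq (X : List Int) (R B : Int) (l r : Int) (hl : 0 ≤ l) (hr : r ≤ R) :
    pvLoopA X R B l r = pvLoopB X R B l r := by
  rw [pvLoopA, pvLoopB]
  by_cases h : l < r
  · simp only [h, dif_pos]
    have hf2 := PySem.Int.floordiv_eq_ediv_of_pos (a := l + r + 1) (b := 2) (by norm_num)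
    have hf2' := PySem.Int.floordiv_eq_ediv_of_pos (a := r - l) (b := 2) (by norm_num)
    have hmid : PySem.Int.floordiv (l + r + 1) 2 = r - PySem.Int.floordiv (r - l) 2 := by
      rw [hf2, hf2']; omega
    have h1 : 1 ≤ PySem.Int.floordiv (l + r + 1) 2 := by rw [hf2]; omega
    have h2 : PySem.Int.floordiv (l + r + 1) 2 ≤ r := by rw [hf2]; omega
    rw [feas_eq X R B _ h1, hmid]
    by_cases hc : pvFeasibleB X R B (r - PySem.Int.floordiv (r - l) 2) = true
    · simp only [hc, if_true]
      exact loop_eq X R B _ r (by rw [hf2'] at *; omega) hr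
    · simp only [hc]
      exact loop_eq X R B l _ hl (by rw [hf2'] at *; omega)
  · simp [h]
termination_by (r - l).toNat
decreasing_by
  all_goals
    simp only [PySem.Int.floordiv_eq_ediv_of_pos (by norm_num : (0:Int) < 2)] at *
    omega

-- ===== VERDICT (by name: the statement is the Claim_ definition above) =====
theorem max_trucks_spec : Claim_equal_max_trucks := by
  intro X R L B _ _
  unfold Spec_max_trucks max_trucks max_trucks_alt
  exact loop_eq X R B 0 R le_rfl le_rfl
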